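-- pv_equiv track=rewrite | github.com/alphatw221/PythonScripts | json.py | __get_midpoint
-- ===== SOURCE A (Python) =====
-- def __get_midpoint(_1d_array):
--     points=[]
--     for i in range(len(_1d_array)):
--         if(_1d_array[i]):
--             points.append(i)
--     if(points):
--         return int((points[0]+points[-1])/2)
--     return None
-- ===== SOURCE B (Python) =====
-- def __get_midpoint(_1d_array):
--     n = len(_1d_array)
--     first = None
--     for i, v in enumerate(_1d_array):
--         if v:
--             first = i
--             break
--     if first is None:
--         return None
--     for j, v in enumerate(reversed(_1d_array)):
--         if v:
--             return int((first + (n - 1 - j)) / 2)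
-- ===== Notes on version B (the rewrite author's own statement) =====
-- stated objective: simpler
-- what changed: Instead of building a list of all truthy indices, B finds the first truthy index by a forward scan with early exit and the last by a backward scan over reversed(), keeping only two integers; same int((first+last)/2) result.
import Mathlib
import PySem

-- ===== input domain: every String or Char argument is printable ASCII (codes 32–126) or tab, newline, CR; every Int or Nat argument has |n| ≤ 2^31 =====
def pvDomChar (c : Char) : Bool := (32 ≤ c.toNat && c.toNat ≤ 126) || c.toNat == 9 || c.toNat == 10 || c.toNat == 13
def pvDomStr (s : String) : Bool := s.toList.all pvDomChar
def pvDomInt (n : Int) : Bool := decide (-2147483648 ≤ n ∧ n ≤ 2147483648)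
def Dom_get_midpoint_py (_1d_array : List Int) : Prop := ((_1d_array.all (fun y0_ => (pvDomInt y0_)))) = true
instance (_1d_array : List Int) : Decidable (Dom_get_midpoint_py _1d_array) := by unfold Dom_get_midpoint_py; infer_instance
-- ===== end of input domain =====

-- B keeps only the first and last truthy indices (forward scan + backward scan over the
-- reversed list) instead of materialising the whole list of truthy indices; same result.


-- ===== PORT A =====
def get_midpoint_py (_1d_array : List Int) : Option Int :=
  -- points = []; for i in range(len(_1d_array)): if _1d_array[i]: points.append(i)
  let points : List Int :=
    (PySem.List.pyRange 0 (_1d_array.length) 1).foldl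
      (fun acc i => if PySem.List.pyGetD _1d_array i 0 ≠ 0 then acc ++ [i] else acc) []
  if points ≠ [] then
    -- int((points[0]+points[-1])/2): truncating division is exact here since both
    -- indices are nonnegative, so Lean's Int division agrees with Python's int(x/2)
    some ((PySem.List.pyGetD points 0 0 + PySem.List.pyGetD points (-1) 0) / 2)
  else none

-- ===== PORT B =====
-- index of the first truthy element, scanning forward (B's first for-loop)
def pvFirstTruthy : List Int → Option Nat
  | [] => none
  | x :: xs => if x ≠ 0 then some 0 else (pvFirstTruthy xs).map (· + 1)

def get_midpoint_py_alt (_1d_array : List Int) : Option Int :=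
  match pvFirstTruthy _1d_array with
  | none => none
  | some first =>
    -- for j, v in enumerate(reversed(_1d_array)): if v: last = n - 1 - j
    match pvFirstTruthy _1d_array.reverse with
    | none => none   -- unreachable: a truthy element exists
    | some j =>
      some (((first : Int) + ((_1d_array.length : Int) - 1 - (j : Int))) / 2)

-- ===== PRECONDITION & SPEC =====
def Spec_get_midpoint_py (_1d_array : List Int) (out : Option Int) : Prop := out = get_midpoint_py_alt _1d_array
instance (_1d_array : List Int) (out : Option Int) : Decidable (Spec_get_midpoint_py _1d_array out) := by unfold Spec_get_midpoint_py; infer_instance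

-- ===== CLAIM (what is proved, stated in full; the proofs are below) =====
def Claim_equal_get_midpoint_py : Prop := ∀ (_1d_array : List Int), Dom_get_midpoint_py _1d_array → Spec_get_midpoint_py _1d_array (get_midpoint_py _1d_array)

-- ===== LEMMAS AND PROOFS =====

-- the (sorted) list of truthy indices of a list, as naturals
def pvTIdx : List Int → List Nat
  | [] => []
  | x :: xs => if x ≠ 0 then 0 :: (pvTIdx xs).map (· + 1) else (pvTIdx xs).map (· + 1)

theorem pvTIdx_lt (a : List Int) : ∀ k ∈ pvTIdx a, k < a.length := by
  induction a with
  | nil => simp [pvTIdx]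
  | cons x xs ih =>
    intro k hk
    simp only [pvTIdx] at hk
    by_cases hx : x ≠ 0 <;> simp [hx] at hk
    · rcases hk with rfl | ⟨m, hm, rfl⟩
      · simp
      · simpa using Nat.succ_lt_succ (ih m hm)
    · rcases hk with ⟨m, hm, rfl⟩
      simpa using Nat.succ_lt_succ (ih m hm)

theorem pvFirstTruthy_eq_head? (a : List Int) : pvFirstTruthy a = (pvTIdx a).head? := by
  induction a with
  | nil => rfl
  | cons x xs ih =>
    by_cases hx : x ≠ 0 <;> simp [pvFirstTruthy, pvTIdx, hx, ih, List.head?_map]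

theorem pvTIdx_append (xs ys : List Int) :
    pvTIdx (xs ++ ys) = pvTIdx xs ++ (pvTIdx ys).map (· + xs.length) := by
  induction xs with
  | nil => simp [pvTIdx]
  | cons x xs ih =>
    by_cases hx : x ≠ 0 <;>
      simp [pvTIdx, hx, ih, List.map_map]

theorem pvTIdx_reverse (a : List Int) :
    pvTIdx a.reverse = ((pvTIdx a).map (fun k => a.length - 1 - k)).reverse := by
  induction a with
  | nil => rfl
  | cons x xs ih =>
    rw [List.reverse_cons, pvTIdx_append, ih]
    by_cases hx : x ≠ 0 <;>
      simp [pvTIdx, hx, List.map_map, Function.comp_def] <;>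
      (intro k _; omega)

theorem pvFilterMapComm {A B : Type} (f : A → B) (p : B → Bool) (l : List A) :
    (l.map f).filter p = (l.filter (fun x => p (f x))).map f := by
  induction l with
  | nil => rfl
  | cons x xs ih => by_cases h : p (f x) <;> simp [h, ih]

theorem pvTIdx_eq_filter (a : List Int) :
    (List.range a.length).filter (fun k => a.getD k 0 ≠ 0) = pvTIdx a := by
  induction a with
  | nil => rfl
  | cons x xs ih =>
    rw [List.length_cons, List.range_succ_eq_map, List.filter_cons, pvFilterMapComm]
    simp only [Nat.succ_eq_add_one, List.getD_cons_succ, List.getD_cons_zero, ih]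
    by_cases hx : x ≠ 0 <;> simp [pvTIdx, hx]

-- A's points list is exactly (pvTIdx a) cast to Int
theorem pvPoints_eq (a : List Int) :
    (PySem.List.pyRange 0 (a.length) 1).foldl
      (fun acc i => if PySem.List.pyGetD a i 0 ≠ 0 then acc ++ [i] else acc) []
    = (pvTIdx a).map (fun (k : Nat) => (k : Int)) := by
  rw [PySem.List.foldl_append_ite_eq_filter, List.nil_append,
      PySem.List.pyRange_zero_nat, pvFilterMapComm, ← pvTIdx_eq_filter]
  exact congrArg (List.map fun (k : Nat) => (k : Int)) (List.filter_congr (fun k _ => by simp))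

theorem get_midpoint_py_eq (a : List Int) : get_midpoint_py a = get_midpoint_py_alt a := by
  unfold get_midpoint_py get_midpoint_py_alt
  rw [pvPoints_eq a]
  rw [pvFirstTruthy_eq_head? a, pvFirstTruthy_eq_head? a.reverse, pvTIdx_reverse a,
      List.head?_reverse, List.getLast?_map]
  rcases ht : pvTIdx a with _ | ⟨f0, rest⟩
  · simp
  · have hne : (f0 :: rest) ≠ ([] : List Nat) := by simp
    have hlast := List.getLast?_eq_some_getLast (l := f0 :: rest) (h := hne)
    set l0 := (f0 :: rest).getLast hne with hl0
    have hl0mem : l0 ∈ f0 :: rest := List.getLast_mem hne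
    have hl0lt : l0 < a.length := by
      have := pvTIdx_lt a l0 (by rw [ht]; exact hl0mem)
      exact this
    have hmapne : ((f0 : Int) :: rest.map (fun (k : Nat) => (k : Int))) ≠ [] := by simp
    have hlastInt : PySem.List.pyGetD ((f0 : Int) :: rest.map (fun (k : Nat) => (k : Int))) (-1) 0
        = (l0 : Int) := by
      rw [PySem.List.pyGetD_neg_one _ _ hmapne]
      have h1 : ((f0 : Int) :: rest.map (fun (k : Nat) => (k : Int))).getLast? = some (l0 : Int) := by
        rw [← List.map_cons, List.getLast?_map, hlast]
        rfl
      have h2 := List.getLast?_eq_some_getLast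
        (l := (f0 : Int) :: rest.map (fun (k : Nat) => (k : Int))) (h := hmapne)
      rw [h2] at h1
      exact Option.some.inj h1
    simp only [List.map_cons, hlast, Option.map_some, List.head?_cons]
    rw [if_pos (by simp), PySem.List.pyGetD_zero_cons, hlastInt]
    have hcast : ((a.length : Int) - 1 - ((a.length - 1 - l0 : Nat) : Int)) = (l0 : Int) := by
      omega
    rw [hcast]

-- ===== VERDICT (by name: the statement is the Claim_ definition above) =====
theorem get_midpoint_py_spec : Claim_equal_get_midpoint_py := by
  intro a _
  unfold Spec_get_midpoint_py
  exact get_midpoint_py_eq a
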